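-- pv_equiv track=rewrite | github.com/OTOYO1020/ChatDev_Intermediate | WareHouse/128_E_2_DefaultOrganization_20250427022820/data_handler.py | populate_blocked_intervals
-- ===== SOURCE A (Python) =====
-- def merge_intervals(intervals):
--     """
--     Merges overlapping or contiguous time intervals.
--     """
--     if not intervals:
--         return []
--     intervals.sort(key=lambda x: x[0])  # Sort intervals by start time
--     merged = [intervals[0]]
--     for current in intervals[1:]:
--         last = merged[-1]
--         if current[0] <= last[1]:  # Overlapping intervals
--             merged[-1] = (last[0], max(last[1], current[1]))  # Merge intervals
--         else:
--             merged.append(current)  # No overlap, add current interval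
--     return merged
--
-- def populate_blocked_intervals(roadworks):
--     """
--     Populates the blocked intervals dictionary from the list of roadworks.
--     """
--     blocked_intervals = {}
--     for X_i, S_i, T_i in roadworks:
--         if S_i > T_i:
--             raise ValueError(f"Invalid interval: Start time {S_i} cannot be greater than end time {T_i}.")
--         if X_i not in blocked_intervals:
--             blocked_intervals[X_i] = []
--         blocked_intervals[X_i].append((S_i, T_i))
--     # Merge intervals for each coordinate
--     for x in blocked_intervals:
--         blocked_intervals[x] = merge_intervals(blocked_intervals[x])
--     return blocked_intervals
-- ===== SOURCE B (Python) =====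
-- def _merge_sweep(pts):
--     """Sweep-line merge: scan sorted start/end events with a depth counter."""
--     starts = sorted(p[0] for p in pts)
--     ends = sorted(p[1] for p in pts)
--     out = []
--     depth = 0
--     cur = 0
--     j = 0
--     for s in starts:
--         # close all intervals that end strictly before the next start
--         # (an end equal to a start keeps the cluster open: touching intervals merge)
--         while j < len(ends) and ends[j] < s:
--             depth -= 1
--             if depth == 0:
--                 out.append((cur, ends[j]))
--             j += 1
--         if depth == 0:
--             cur = s
--         depth += 1
--     while j < len(ends):
--         depth -= 1
--         if depth == 0:
--             out.append((cur, ends[j]))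
--         j += 1
--     return out
--
-- def populate_blocked_intervals(roadworks):
--     for X_i, S_i, T_i in roadworks:
--         if S_i > T_i:
--             raise ValueError(f"Invalid interval: Start time {S_i} cannot be greater than end time {T_i}.")
--     coords = list(dict.fromkeys(x for x, _, _ in roadworks))
--     return {x: _merge_sweep([(s, t) for y, s, t in roadworks if y == x]) for x in coords}
-- ===== Notes on version B (the rewrite author's own statement) =====
-- stated objective: alternative
-- what changed: Grouping no longer builds a dict of appended lists (B dedups the coordinates and filters the roadworks per coordinate), and the per-coordinate merge replaces sort-intervals-then-extend-the-last-cluster by a sweep line: starts and ends are sorted separately and scanned with a depth counter that opens a cluster when it leaves 0 and emits (start, end) when it returns to 0.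
import Mathlib
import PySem

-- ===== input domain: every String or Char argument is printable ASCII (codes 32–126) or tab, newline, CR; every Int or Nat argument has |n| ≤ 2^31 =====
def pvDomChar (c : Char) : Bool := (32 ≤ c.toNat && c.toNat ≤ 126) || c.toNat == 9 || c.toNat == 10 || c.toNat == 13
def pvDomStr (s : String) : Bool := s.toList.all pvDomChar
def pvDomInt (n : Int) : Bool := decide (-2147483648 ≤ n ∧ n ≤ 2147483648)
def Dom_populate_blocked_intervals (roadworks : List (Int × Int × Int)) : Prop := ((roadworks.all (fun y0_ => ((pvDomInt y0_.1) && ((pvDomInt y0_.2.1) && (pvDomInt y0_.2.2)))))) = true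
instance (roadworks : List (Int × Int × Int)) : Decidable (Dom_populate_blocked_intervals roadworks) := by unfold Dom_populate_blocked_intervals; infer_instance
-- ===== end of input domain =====

-- B replaces the per-coordinate sort-then-extend-last merge by a sweep over separately sorted
-- start/end event lists with a depth counter, and groups by deduplicated coordinate + filter
-- instead of a dict of appended lists (objective: alternative; same return value on Pre_).
-- A sorts its local per-coordinate lists in place; the argument `roadworks` is never mutated.

-- ===== PORT A =====
-- body of A's `for current in intervals[1:]` loop (merged[-1] read/replace, or append)
def mergeStepA (merged : List (Int × Int)) (cur : Int × Int) : List (Int × Int) :=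
  match merged.getLast? with
  | some last => if cur.1 ≤ last.2 then merged.dropLast ++ [(last.1, max last.2 cur.2)]
                 else merged ++ [cur]
  | none => merged ++ [cur]

def merge_intervals (intervals : List (Int × Int)) : List (Int × Int) :=
  -- `if not intervals: return []` + `intervals.sort(key=lambda x: x[0])` + `merged = [intervals[0]]`
  match PySem.List.sorted intervals (fun p => p.1) with
  | [] => []
  | h :: t => t.foldl mergeStepA [h]

def populate_blocked_intervals (roadworks : List (Int × Int × Int)) : List (Int × List (Int × Int)) :=
  let blocked := roadworks.foldl (fun d r =>
    if r.2.1 > r.2.2 then d   -- `raise ValueError(...)`: these inputs are excluded by Pre_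
    else
      let d' := if d.contains r.1 then d else d.insert r.1 []   -- `if X_i not in blocked: blocked[X_i] = []`
      d'.modify r.1 [] (fun l => l ++ [(r.2.1, r.2.2)]))        -- `blocked[X_i].append((S_i, T_i))`
    PySem.Dict.empty
  -- `for x in blocked: blocked[x] = merge_intervals(blocked[x])` and return the dict
  blocked.items.map (fun p => (p.1, merge_intervals p.2))

-- ===== PORT B =====
-- inner `while j < len(ends) and ends[j] < s` loop: returns (remaining ends, depth, out)
def closeBelow (c : Int) : List Int → Int → Int → List (Int × Int) → List Int × Int × List (Int × Int)
  | [], depth, _, out => ([], depth, out)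
  | e :: es, depth, cur, out =>
    if e < c then
      closeBelow c es (depth - 1) cur (if depth - 1 == 0 then out ++ [(cur, e)] else out)
    else (e :: es, depth, out)

-- `for s in starts` loop: returns (remaining ends, depth, cur, out)
def sweepStarts : List Int → List Int → Int → Int → List (Int × Int) → List Int × Int × Int × List (Int × Int)
  | [], ends, depth, cur, out => (ends, depth, cur, out)
  | s :: ss, ends, depth, cur, out =>
    let t := closeBelow s ends depth cur out
    sweepStarts ss t.1 (t.2.1 + 1) (if t.2.1 == 0 then s else cur) t.2.2

-- trailing `while j < len(ends)` drain loop
def drainEnds : List Int → Int → Int → List (Int × Int) → List (Int × Int)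
  | [], _, _, out => out
  | e :: es, depth, cur, out =>
    drainEnds es (depth - 1) cur (if depth - 1 == 0 then out ++ [(cur, e)] else out)

def merge_sweep (pts : List (Int × Int)) : List (Int × Int) :=
  let starts := PySem.List.sorted (pts.map (fun p => p.1)) (fun x => x)
  let endsL := PySem.List.sorted (pts.map (fun p => p.2)) (fun x => x)
  let st := sweepStarts starts endsL 0 0 []
  drainEnds st.1 st.2.1 st.2.2.1 st.2.2.2

def populate_blocked_intervals_alt (roadworks : List (Int × Int × Int)) : List (Int × List (Int × Int)) :=
  -- Source B's validation loop raises on s > t (excluded by Pre_) and changes nothing otherwise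
  let coords := PySem.List.dedup (roadworks.map (fun r => r.1))   -- list(dict.fromkeys(...))
  coords.map (fun x =>
    (x, merge_sweep ((roadworks.filter (fun r => r.1 == x)).map (fun r => (r.2.1, r.2.2)))))

-- ===== PRECONDITION & SPEC =====
-- Pre_ excludes exactly the inputs containing a triple with start > end, on which A (and B)
-- raise ValueError and return nothing.
def Pre_populate_blocked_intervals (roadworks : List (Int × Int × Int)) : Prop :=
  ∀ r ∈ roadworks, r.2.1 ≤ r.2.2
instance (roadworks : List (Int × Int × Int)) : Decidable (Pre_populate_blocked_intervals roadworks) := by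
  unfold Pre_populate_blocked_intervals; infer_instance

def pvWitness_populate_blocked_intervals : (List (Int × Int × Int)) :=
  [(0, 1, 3), (0, 2, 5), (1, 4, 4), (0, 6, 7)]

def Spec_populate_blocked_intervals (roadworks : List (Int × Int × Int)) (out : List (Int × List (Int × Int))) : Prop :=
  out = populate_blocked_intervals_alt roadworks
instance (roadworks : List (Int × Int × Int)) (out : List (Int × List (Int × Int))) : Decidable (Spec_populate_blocked_intervals roadworks out) := by
  unfold Spec_populate_blocked_intervals; infer_instance

-- ===== CLAIM =====
def Claim_equal_populate_blocked_intervals : Prop :=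
  ∀ (roadworks : List (Int × Int × Int)), Dom_populate_blocked_intervals roadworks →
    Pre_populate_blocked_intervals roadworks →
    Spec_populate_blocked_intervals roadworks (populate_blocked_intervals roadworks)


-- ===== LEMMAS AND PROOFS =====

-- ghost form of A's merge loop: running cluster (a, b), remaining sorted intervals
def extendG (a b : Int) : List (Int × Int) → List (Int × Int)
  | [] => [(a, b)]
  | p :: r => if p.1 ≤ b then extendG a (max b p.2) r else (a, b) :: extendG p.1 p.2 r

-- proof-side projection-style reading of B's sweep (merge_sweep's let-block)
def sweepRun (starts E : List Int) (depth cur : Int) (out : List (Int × Int)) : List (Int × Int) :=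
  drainEnds (sweepStarts starts E depth cur out).1 (sweepStarts starts E depth cur out).2.1
    (sweepStarts starts E depth cur out).2.2.1 (sweepStarts starts E depth cur out).2.2.2

theorem foldA_extend : ∀ (t done : List (Int × Int)) (a b : Int),
    t.foldl mergeStepA (done ++ [(a, b)]) = done ++ extendG a b t := by
  intro t
  induction t with
  | nil => intro done a b; simp [extendG]
  | cons p t ih =>
    intro done a b
    simp only [List.foldl_cons, mergeStepA, List.getLast?_concat, List.dropLast_concat, extendG]
    by_cases hp : p.1 ≤ b
    · simp only [hp, if_pos]
      exact ih done a (max b p.2)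
    · simp only [hp, if_neg, not_false_iff]
      have := ih (done ++ [(a, b)]) p.1 p.2
      simpa using this

theorem closeBelow_stop (c : Int) (E : List Int) (depth cur : Int) (out : List (Int × Int))
    (h : ∀ e ∈ E, ¬ e < c) : closeBelow c E depth cur out = (E, depth, out) := by
  cases E with
  | nil => rfl
  | cons e es => simp [closeBelow, h e (by simp)]

theorem closeBelow_noemit (c : Int) : ∀ (E : List Int) (depth cur : Int) (out : List (Int × Int)),
    (((E.takeWhile (fun e => decide (e < c))).length : Int) < depth ∨ depth ≤ 0) →
    closeBelow c E depth cur out =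
      (E.dropWhile (fun e => decide (e < c)),
       depth - (E.takeWhile (fun e => decide (e < c))).length, out) := by
  intro E
  induction E with
  | nil => intro depth cur out _; simp [closeBelow]
  | cons e es ih =>
    intro depth cur out h
    by_cases he : e < c
    · have hlen : ((e :: es).takeWhile (fun e => decide (e < c))).length
          = (es.takeWhile (fun e => decide (e < c))).length + 1 := by simp [he]
      rw [hlen] at h
      have hne : (depth - 1 == 0) = false := by
        simp only [beq_eq_false_iff_ne, ne_eq]; push_cast at h; omega
      have ih' := ih (depth - 1) cur out (by push_cast at h ⊢; omega)
      simp only [closeBelow, he, if_pos, hne, Bool.false_eq_true, if_false, ih', hlen]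
      simp [he]
      ring_nf
    · simp [closeBelow, he]

theorem closeBelow_emit (c : Int) : ∀ (E P : List Int) (m cur : Int) (out : List (Int × Int)),
    E.takeWhile (fun e => decide (e < c)) = P ++ [m] →
    closeBelow c E ((P.length : Int) + 1) cur out =
      (E.dropWhile (fun e => decide (e < c)), 0, out ++ [(cur, m)]) := by
  intro E
  induction E with
  | nil => intro P m cur out h; simp at h
  | cons e es ih =>
    intro P m cur out h
    by_cases he : e < c
    · rw [List.takeWhile_cons_of_pos (by simpa using he)] at h
      rw [List.dropWhile_cons_of_pos (by simpa using he)]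
      cases P with
      | nil =>
        have h1 : e = m := by simpa using congrArg (fun l => l.headD 0) h
        have h2 : es.takeWhile (fun e => decide (e < c)) = [] := by
          have := congrArg List.tail h; simpa [h1] using this
        subst h1
        simp only [List.length_nil, Nat.cast_zero, zero_add, closeBelow, he, if_pos]
        norm_num
        rw [closeBelow_noemit c es 0 cur (out ++ [(cur, e)]) (Or.inr le_rfl)]
        simp [h2]
      | cons p P' =>
        have h1 : e = p := by simpa using congrArg (fun l => l.headD 0) h
        have h2 : es.takeWhile (fun e => decide (e < c)) = P' ++ [m] := by
          have := congrArg List.tail h; simpa using this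
        subst h1
        simp only [closeBelow, he, if_pos, List.length_cons]
        have hne : ((((P'.length + 1 : Nat) : Int)) + 1 - 1 == 0) = false := by
          simp only [beq_eq_false_iff_ne, ne_eq]; push_cast; omega
        simp only [hne, Bool.false_eq_true, if_false]
        have harith : (((P'.length + 1 : Nat) : Int)) + 1 - 1 = (P'.length : Int) + 1 := by
          push_cast; ring
        rw [harith, ih P' m cur out h2]
    · rw [List.takeWhile_cons_of_neg (by simpa using he)] at h
      exact absurd h (by simp)

theorem drain_concat : ∀ (P : List Int) (m cur : Int) (out : List (Int × Int)),
    drainEnds (P ++ [m]) ((P.length : Int) + 1) cur out = out ++ [(cur, m)] := by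
  intro P
  induction P with
  | nil => intro m cur out; simp [drainEnds]
  | cons p P' ih =>
    intro m cur out
    simp only [List.cons_append, drainEnds, List.length_cons]
    have hne : ((((P'.length + 1 : Nat) : Int)) + 1 - 1 == 0) = false := by
      simp only [beq_eq_false_iff_ne, ne_eq]; push_cast; omega
    simp only [hne, Bool.false_eq_true, if_false]
    have harith : (((P'.length + 1 : Nat) : Int)) + 1 - 1 = (P'.length : Int) + 1 := by
      push_cast; ring
    rw [harith, ih]

-- a ≤-sorted list that is a permutation of U ends in U's maximum
theorem sorted_last_max (S U : List Int) (b : Int) (hperm : S.Perm U)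
    (hsort : S.Pairwise (fun x1 x2 => x1 ≤ x2)) (hb : b ∈ U) (hmax : ∀ u ∈ U, u ≤ b) :
    ∃ P, S = P ++ [b] := by
  have hne : S ≠ [] := by
    intro h; subst h
    exact absurd (hperm.symm.subset hb) (by simp)
  have hdec : S.dropLast ++ [S.getLast hne] = S := List.dropLast_concat_getLast hne
  refine ⟨S.dropLast, ?_⟩
  have hm : S.getLast hne = b := by
    have hmem : S.getLast hne ∈ U := hperm.subset (List.getLast_mem hne)
    have h1 : S.getLast hne ≤ b := hmax _ hmem
    have hbS : b ∈ S := hperm.symm.subset hb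
    rw [← hdec] at hbS hsort
    rcases List.mem_append.mp hbS with hP | hlast
    · have := (List.pairwise_append.mp hsort).2.2 b hP (S.getLast hne)
        (List.mem_singleton_self _)
      omega
    · simp at hlast; omega
  rw [hm] at hdec; exact hdec.symm

theorem takeWhile_sorted_eq_filter (c : Int) : ∀ (E : List Int),
    E.Pairwise (fun x1 x2 => x1 ≤ x2) →
    E.takeWhile (fun e => decide (e < c)) = E.filter (fun e => decide (e < c)) ∧
    E.dropWhile (fun e => decide (e < c)) = E.filter (fun e => !decide (e < c)) := by
  intro E
  induction E with
  | nil => intro _; simp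
  | cons e es ih =>
    intro h
    rw [List.pairwise_cons] at h
    obtain ⟨he, hes⟩ := h
    obtain ⟨ihT, ihD⟩ := ih hes
    by_cases hc : e < c
    · simp [hc, ihT, ihD]
    · have hall : ∀ x ∈ es, ¬ x < c := fun x hx => by have := he x hx; omega
      constructor
      · rw [List.takeWhile_cons_of_neg (by simpa using hc)]
        symm; simp only [List.filter_eq_nil_iff]
        intro x hx
        rcases List.mem_cons.mp hx with rfl | hx'
        · simpa using hc
        · simpa using hall x hx'
      · rw [List.dropWhile_cons_of_neg (by simpa using hc)]
        symm; rw [List.filter_eq_self]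
        intro x hx
        rcases List.mem_cons.mp hx with rfl | hx'
        · simpa using hc
        · simpa using hall x hx'

-- simulation invariant: sweep state vs ghost state
theorem sim : ∀ (r : List (Int × Int)) (E U : List Int) (a b : Int) (out : List (Int × Int)),
    E.Pairwise (fun x1 x2 => x1 ≤ x2) → E.Perm (U ++ r.map (fun p => p.2)) →
    U ≠ [] → b ∈ U → (∀ u ∈ U, u ≤ b) →
    r.Pairwise (fun p q => p.1 ≤ q.1) → (∀ p ∈ r, p.1 ≤ p.2) →
    sweepRun (r.map (fun p => p.1)) E ((U.length : Int)) a out = out ++ extendG a b r := by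
  intro r
  induction r with
  | nil =>
    intro E U a b out hE hperm hUne hbU hmax _ _
    have hpermU : E.Perm U := by simpa using hperm
    obtain ⟨P, hP⟩ := sorted_last_max E U b hpermU hE hbU hmax
    have hlen : (U.length : Int) = (P.length : Int) + 1 := by
      have := hpermU.length_eq
      rw [hP] at this; simp at this; omega
    simp only [List.map_nil, sweepRun, sweepStarts, extendG]
    rw [hP, hlen]
    exact drain_concat P b a out
  | cons p r' ih =>
    intro E U a b out hE hperm hUne hbU hmax hpair hst
    have hpc : p.1 ≤ p.2 := hst p (by simp)
    have hpr' : ∀ q ∈ r', p.1 ≤ q.1 := (List.pairwise_cons.mp hpair).1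
    have hends : ∀ e ∈ (p :: r').map (fun p => p.2), p.1 ≤ e := by
      intro e hme
      obtain ⟨q, hq, rfl⟩ := List.mem_map.mp hme
      rcases List.mem_cons.mp hq with rfl | hq'
      · exact hpc
      · exact le_trans (hpr' q hq') (hst q (List.mem_cons_of_mem _ hq'))
    obtain ⟨htw, hdw⟩ := takeWhile_sorted_eq_filter p.1 E hE
    have hfperm : (E.filter (fun e => decide (e < p.1))).Perm
        (U.filter (fun e => decide (e < p.1))) := by
      have h1 := hperm.filter (fun e => decide (e < p.1))
      rw [List.filter_append] at h1
      have h0 : ((p :: r').map (fun p => p.2)).filter (fun e => decide (e < p.1)) = [] := by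
        simp only [List.filter_eq_nil_iff]
        intro e hme; have := hends e hme; simpa using (by omega : ¬ e < p.1)
      rwa [h0, List.append_nil] at h1
    have hdperm : (E.filter (fun e => !decide (e < p.1))).Perm
        (U.filter (fun e => !decide (e < p.1)) ++ (p :: r').map (fun p => p.2)) := by
      have h1 := hperm.filter (fun e => !decide (e < p.1))
      rw [List.filter_append] at h1
      have h0 : ((p :: r').map (fun p => p.2)).filter (fun e => !decide (e < p.1))
          = (p :: r').map (fun p => p.2) := by
        rw [List.filter_eq_self]
        intro e hme; have := hends e hme; simpa using (by omega : ¬ e < p.1)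
      rwa [h0] at h1
    have hEdw : (E.dropWhile (fun e => decide (e < p.1))).Pairwise (fun x1 x2 => x1 ≤ x2) :=
      hE.sublist (List.dropWhile_sublist _)
    have hpartU : (U.filter (fun e => decide (e < p.1))).length
        + (U.filter (fun e => !decide (e < p.1))).length = U.length := by
      have h2 := (List.filter_append_perm (fun e => decide (e < p.1)) U).length_eq
      rwa [List.length_append] at h2
    by_cases hcb : p.1 ≤ b
    · -- merge into the running cluster
      have hbin : b ∈ U.filter (fun e => !decide (e < p.1)) :=
        List.mem_filter.mpr ⟨hbU, by simpa using (by omega : ¬ b < p.1)⟩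
      have hpos : 0 < (U.filter (fun e => !decide (e < p.1))).length :=
        List.length_pos_of_mem hbin
      have hlt : (((E.takeWhile (fun e => decide (e < p.1))).length : Int)) < (U.length : Int) := by
        rw [htw, hfperm.length_eq]; push_cast; omega
      simp only [List.map_cons, sweepRun, sweepStarts]
      rw [closeBelow_noemit p.1 E _ a out (Or.inl hlt)]
      have hdepth : (U.length : Int) - (E.takeWhile (fun e => decide (e < p.1))).length
          = ((U.filter (fun e => !decide (e < p.1))).length : Int) := by
        rw [htw, hfperm.length_eq]; push_cast; omega
      have hne0 : (((U.length : Int) - (E.takeWhile (fun e => decide (e < p.1))).length) == 0)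
          = false := by
        rw [hdepth]; simp only [beq_eq_false_iff_ne, ne_eq]; push_cast; omega
      simp only [hne0, Bool.false_eq_true, if_false]
      have hrec := ih (E.dropWhile (fun e => decide (e < p.1)))
        (U.filter (fun e => !decide (e < p.1)) ++ [p.2]) a (max b p.2) out hEdw
        (by
          rw [hdw]
          refine hdperm.trans ?_
          simp only [List.map_cons]
          exact List.Perm.of_eq (by simp))
        (by simp)
        (by
          rcases le_total p.2 b with hd | hd
          · rw [max_eq_left hd]; exact List.mem_append_left _ hbin
          · rw [max_eq_right hd]; exact List.mem_append_right _ (by simp))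
        (by
          intro u hu
          rcases List.mem_append.mp hu with hu' | hu'
          · exact le_trans (hmax u (List.mem_of_mem_filter hu')) (le_max_left _ _)
          · simp at hu'; subst hu'; exact le_max_right _ _)
        ((List.pairwise_cons.mp hpair).2)
        (fun q hq => hst q (List.mem_cons_of_mem _ hq))
      rw [show ((U.filter (fun e => !decide (e < p.1)) ++ [p.2]).length : Int)
            = (U.length : Int) - (E.takeWhile (fun e => decide (e < p.1))).length + 1 by
          rw [hdepth]; push_cast; simp] at hrec
      rw [sweepRun] at hrec
      rw [hrec]
      simp [extendG, hcb]
    · -- the running cluster closes; a new one opens at p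
      have hUall : ∀ u ∈ U, u < p.1 := fun u hu => by have := hmax u hu; omega
      have hfU : U.filter (fun e => decide (e < p.1)) = U := by
        rw [List.filter_eq_self]; intro u hu; simpa using hUall u hu
      have hfU' : U.filter (fun e => !decide (e < p.1)) = [] := by
        simp only [List.filter_eq_nil_iff]; intro u hu; simpa using (hUall u hu)
      have htwperm : (E.takeWhile (fun e => decide (e < p.1))).Perm U := by
        rw [htw]; exact hfperm.trans (List.Perm.of_eq hfU)
      have htwsort : (E.takeWhile (fun e => decide (e < p.1))).Pairwise (fun x1 x2 => x1 ≤ x2) :=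
        hE.sublist (List.takeWhile_sublist _)
      obtain ⟨P, hP⟩ := sorted_last_max _ U b htwperm htwsort hbU hmax
      have hlen : (U.length : Int) = (P.length : Int) + 1 := by
        have := htwperm.length_eq
        rw [hP] at this; simp at this; omega
      simp only [List.map_cons, sweepRun, sweepStarts]
      rw [hlen, closeBelow_emit p.1 E P b a out hP]
      simp only [beq_self_eq_true, if_pos, zero_add]
      have hrec := ih (E.dropWhile (fun e => decide (e < p.1))) [p.2] p.1 p.2
        (out ++ [(a, b)]) hEdw
        (by
          rw [hdw]
          refine hdperm.trans ?_
          rw [hfU']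
          simp)
        (by simp) (by simp) (by simp)
        ((List.pairwise_cons.mp hpair).2)
        (fun q hq => hst q (List.mem_cons_of_mem _ hq))
      simp only [List.length_cons, List.length_nil, Nat.cast_one, Nat.cast_zero, zero_add] at hrec
      rw [sweepRun] at hrec
      rw [hrec]
      simp [extendG, hcb]

theorem merge_eq (pts : List (Int × Int)) (h : ∀ p ∈ pts, p.1 ≤ p.2) :
    merge_intervals pts = merge_sweep pts := by
  have hms : merge_sweep pts = sweepRun (PySem.List.sorted (pts.map (fun p => p.1)) (fun x => x))
      (PySem.List.sorted (pts.map (fun p => p.2)) (fun x => x)) 0 0 [] := rfl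
  cases hs : PySem.List.sorted pts (fun p => p.1) with
  | nil =>
    have hpts : pts = [] := (PySem.List.sorted_eq_nil_iff _ _ _).mp hs
    subst hpts
    rfl
  | cons h0 t =>
    have hsp : (h0 :: t).Perm pts := by
      rw [← hs]; exact PySem.List.sorted_perm pts (fun p => p.1) false
    have hsortp : (h0 :: t).Pairwise (fun a b => a.1 ≤ b.1) := by
      rw [← hs]; exact PySem.List.sorted_pairwise pts (fun p => p.1)
    have hA : merge_intervals pts = [] ++ extendG h0.1 h0.2 t := by
      simp only [merge_intervals, hs]
      simpa using foldA_extend t [] h0.1 h0.2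
    have hstarts : PySem.List.sorted (pts.map (fun p => p.1)) (fun x => x)
        = (h0 :: t).map (fun p => p.1) := by
      apply PySem.List.sorted_id_eq_of_perm_of_pairwise
      · exact hsp.map (fun p => p.1)
      · exact List.pairwise_map.mpr hsortp
    have hEsort : (PySem.List.sorted (pts.map (fun p => p.2)) (fun x => x)).Pairwise
        (fun x1 x2 => x1 ≤ x2) := PySem.List.sorted_pairwise (pts.map (fun p => p.2)) (fun x => x)
    have hEperm : (PySem.List.sorted (pts.map (fun p => p.2)) (fun x => x)).Perm
        ([h0.2] ++ t.map (fun p => p.2)) := by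
      refine (PySem.List.sorted_perm (pts.map (fun p => p.2)) (fun x => x) false).trans ?_
      simpa using (hsp.symm.map (fun p => p.2))
    have hmem : ∀ q ∈ h0 :: t, q.1 ≤ q.2 := fun q hq => h q (hsp.subset hq)
    have hmin : ∀ q ∈ h0 :: t, h0.1 ≤ q.1 := by
      intro q hq
      rcases List.mem_cons.mp hq with rfl | hq'
      · exact le_refl _
      · exact (List.pairwise_cons.mp hsortp).1 q hq'
    have hstop : ∀ e ∈ PySem.List.sorted (pts.map (fun p => p.2)) (fun x => x), ¬ e < h0.1 := by
      intro e he
      have : e ∈ [h0.2] ++ t.map (fun p => p.2) := hEperm.subset he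
      simp only [List.cons_append, List.nil_append, List.mem_cons, List.mem_map] at this
      rcases this with rfl | ⟨q, hq, rfl⟩
      · have := hmem h0 (by simp); omega
      · have h1 := hmin q (List.mem_cons_of_mem _ hq)
        have h2 := hmem q (List.mem_cons_of_mem _ hq)
        omega
    rw [hA, hms, hstarts]
    simp only [List.map_cons, sweepRun, sweepStarts]
    rw [closeBelow_stop _ _ _ _ _ hstop]
    simp only [beq_self_eq_true, if_pos]
    have hrec := sim t (PySem.List.sorted (pts.map (fun p => p.2)) (fun x => x)) [h0.2] h0.1 h0.2
      [] hEsort hEperm (by simp) (by simp) (by simp)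
      ((List.pairwise_cons.mp hsortp).2)
      (fun q hq => hmem q (List.mem_cons_of_mem _ hq))
    simp only [List.length_cons, List.length_nil, Nat.cast_one, Nat.cast_zero, zero_add,
      List.nil_append] at hrec ⊢
    rw [sweepRun] at hrec
    exact hrec.symm

theorem step_eq_modify (d : PySem.Dict Int (List (Int × Int))) (x : Int) (v : Int × Int) :
    ((if d.contains x then d else d.insert x []).modify x [] (fun l => l ++ [v]))
      = d.modify x [] (fun l => l ++ [v]) := by
  by_cases hc : d.contains x
  · simp [hc]
  · simp only [hc, Bool.false_eq_true, if_false]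
    unfold PySem.Dict.modify
    rw [PySem.Dict.getD_insert_self, PySem.Dict.insert_insert_self]
    simp [PySem.Dict.getD_of_not_contains, hc]

-- ===== VERDICT =====
theorem dict_items_char (rws : List (Int × Int × Int))
    (hpre : ∀ r ∈ rws, r.2.1 ≤ r.2.2) :
    (rws.foldl (fun d r =>
        if r.2.1 > r.2.2 then d
        else
          let d' := if d.contains r.1 then d else d.insert r.1 []
          d'.modify r.1 [] (fun l => l ++ [(r.2.1, r.2.2)])) PySem.Dict.empty).items
      = (PySem.Set.ofList (rws.map (fun r => r.1))).map (fun k =>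
          (k, (rws.filter (fun r => r.1 == k)).map (fun r => (r.2.1, r.2.2)))) := by
  have hstep : rws.foldl (fun d r =>
        if r.2.1 > r.2.2 then d
        else
          let d' := if d.contains r.1 then d else d.insert r.1 []
          d'.modify r.1 [] (fun l => l ++ [(r.2.1, r.2.2)])) PySem.Dict.empty
      = (rws.map (fun r => (r.1, (r.2.1, r.2.2)))).foldl
          (fun d p => d.modify p.1 [] (fun l => l ++ [p.2])) PySem.Dict.empty := by
    rw [List.foldl_map]
    apply PySem.List.foldl_congr_mem
    intro acc r hr
    have hle : ¬ r.2.1 > r.2.2 := by have := hpre r hr; omega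
    rw [if_neg hle]
    exact step_eq_modify acc r.1 (r.2.1, r.2.2)
  rw [hstep]
  set l := rws.map (fun r => (r.1, (r.2.1, r.2.2))) with hl
  have hnd : ((l.foldl (fun d p => d.modify p.1 [] (fun v => v ++ [p.2]))
      PySem.Dict.empty)).keys.Nodup := by
    apply PySem.Dict.nodup_keys_foldl_modify_key l (fun p => p.1) [] (fun _ p => fun v => v ++ [p.2])
    simp [PySem.Dict.keys_empty]
  have hkeys : ((l.foldl (fun d p => d.modify p.1 [] (fun v => v ++ [p.2]))
      PySem.Dict.empty)).keys = PySem.Set.ofList (rws.map (fun r => r.1)) := by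
    rw [PySem.Dict.keys_foldl_modify_key l (fun p => p.1) [] (fun _ p => fun v => v ++ [p.2])]
    rw [PySem.Set.ofList_eq_foldl]
    simp [PySem.Set.update, PySem.Dict.keys_empty, hl, List.map_map, Function.comp_def]
  rw [PySem.Dict.items_eq_map_keys _ hnd [], hkeys]
  apply List.map_congr_left
  intro k _
  rw [PySem.Dict.getD_foldl_modify_append l PySem.Dict.empty k, PySem.Dict.getD_empty]
  simp [hl, List.filter_map, List.map_map, Function.comp_def]

-- ===== VERDICT =====
theorem populate_blocked_intervals_spec : Claim_equal_populate_blocked_intervals := by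
  intro rws _hdom hpre
  unfold Spec_populate_blocked_intervals
  unfold populate_blocked_intervals populate_blocked_intervals_alt
  simp only []
  rw [dict_items_char rws hpre]
  rw [List.map_map]
  have hcoords : PySem.List.dedup (rws.map (fun r => r.1))
      = PySem.Set.ofList (rws.map (fun r => r.1)) := by simp
  rw [hcoords]
  apply List.map_congr_left
  intro k _
  simp only [Function.comp_def]
  congr 1
  apply merge_eq
  intro p hp
  simp only [List.mem_map, List.mem_filter] at hp
  obtain ⟨r, ⟨hr, _⟩, rfl⟩ := hp
  exact hpre r hr
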